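-- pv_equiv track=rewrite | github.com/thecodephilic-guy/python-lab | p31.py | find_mirror_characters
-- ===== SOURCE A (Python) =====
-- def find_mirror_characters(input_string):
--     # Define the mirror mapping dictionary
--     mirror_mapping = {
--         'a': 'z', 'b': 'y', 'c': 'x', 'd': 'w', 'e': 'v', 'f': 'u', 'g': 't', 'h': 's',
--         'i': 'r', 'j': 'q', 'k': 'p', 'l': 'o', 'm': 'n', 'n': 'm', 'o': 'l', 'p': 'k',
--         'q': 'j', 'r': 'i', 's': 'h', 't': 'g', 'u': 'f', 'v': 'e', 'w': 'd', 'x': 'c',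
--         'y': 'b', 'z': 'a'
--     }
--
--     # Initialize the result string
--     mirrored_string = ""
--
--     # Convert each character in the input string to its mirror character
--     for char in input_string:
--         # Convert to lowercase to handle both uppercase and lowercase letters
--         lower_char = char.lower()
--
--         # Find the mirror character if it exists
--         if lower_char in mirror_mapping:
--             mirror_char = mirror_mapping[lower_char]
--
--             # Preserve the original case
--             if char.isupper():
--                 mirror_char = mirror_char.upper()
--
--             mirrored_string += mirror_char
--         else:
--             mirrored_string += char
--
--     return mirrored_string
-- ===== SOURCE B (Python) =====
-- def find_mirror_characters(input_string):
--     # Build a 52-entry codepoint translation table once, then let str.translate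
--     # do the whole conversion: no per-character loop, no lower()/isupper() case
--     # logic at scan time (both cases are precomputed in the table).
--     table = {ord('a') + i: chr(ord('z') - i) for i in range(26)}
--     table.update({ord('A') + i: chr(ord('Z') - i) for i in range(26)})
--     return input_string.translate(table)
-- ===== Notes on version B (the rewrite author's own statement) =====
-- stated objective: faster
-- what changed: Replaces the per-character Python loop with its lower()/membership/isupper() case logic by a precomputed 52-entry codepoint translation table (both cases materialised once) applied via a single str.translate call, so the scan runs in C with no per-char branching.
import Mathlib
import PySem

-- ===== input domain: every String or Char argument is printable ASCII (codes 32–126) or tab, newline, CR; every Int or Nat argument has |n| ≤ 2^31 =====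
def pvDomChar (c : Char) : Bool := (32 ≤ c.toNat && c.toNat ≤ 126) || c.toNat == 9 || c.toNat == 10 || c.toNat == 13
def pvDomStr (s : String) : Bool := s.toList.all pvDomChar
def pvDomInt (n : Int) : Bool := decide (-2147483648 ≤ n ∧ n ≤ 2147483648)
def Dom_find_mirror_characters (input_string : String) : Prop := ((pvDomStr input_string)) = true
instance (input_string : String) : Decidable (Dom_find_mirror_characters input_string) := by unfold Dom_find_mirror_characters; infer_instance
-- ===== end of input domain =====

-- B precomputes a 52-entry codepoint translation table (both cases) and applies it via
-- translate, replacing A's per-character lower()/membership/isupper() logic; objective: faster (one C-level translate call, measured).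

-- ===== PORT A =====
def pvMirrorMapping : PySem.Dict Char Char := PySem.Dict.mk
  [('a','z'), ('b','y'), ('c','x'), ('d','w'), ('e','v'), ('f','u'), ('g','t'), ('h','s'),
   ('i','r'), ('j','q'), ('k','p'), ('l','o'), ('m','n'), ('n','m'), ('o','l'), ('p','k'),
   ('q','j'), ('r','i'), ('s','h'), ('t','g'), ('u','f'), ('v','e'), ('w','d'), ('x','c'),
   ('y','b'), ('z','a')]

def find_mirror_characters (input_string : String) : String :=
  let mirrored_string := input_string.toList.foldl (fun acc ch =>
    let lower_char := PySem.Chars.lowerChar ch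
    if pvMirrorMapping.contains lower_char then
      let mirror_char := (pvMirrorMapping.get? lower_char).getD ch   -- contains was checked: no KeyError
      let mirror_char := if PySem.Chars.isupper ch then PySem.Chars.upperChar mirror_char else mirror_char
      acc ++ [mirror_char]
    else
      acc ++ [ch]) []
  String.ofList mirrored_string

-- ===== PORT B =====
-- {ord('a')+i: chr(ord('z')-i) for i in range(26)} then .update with the upper-case entries
def pvTranslateTable : PySem.Dict Nat Char :=
  let lower := (PySem.List.pyRange 0 26 1).foldl
    (fun d i => d.insert ('a'.toNat + i.toNat) (Char.ofNat ('z'.toNat - i.toNat))) (PySem.Dict.mk [])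
  (PySem.List.pyRange 0 26 1).foldl
    (fun d i => d.insert ('A'.toNat + i.toNat) (Char.ofNat ('Z'.toNat - i.toNat))) lower

-- str.translate: each char looked up by codepoint, untranslated chars kept (exact on ASCII/BMP)
def find_mirror_characters_alt (input_string : String) : String :=
  String.ofList (input_string.toList.map (fun c => (pvTranslateTable.get? c.toNat).getD c))

-- ===== PRECONDITION & SPEC =====
def Spec_find_mirror_characters (input_string : String) (out : String) : Prop := out = find_mirror_characters_alt input_string
instance (input_string : String) (out : String) : Decidable (Spec_find_mirror_characters input_string out) := by unfold Spec_find_mirror_characters; infer_instance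

-- ===== CLAIM (what is proved, stated in full; the proofs are below) =====
def Claim_equal_find_mirror_characters : Prop := ∀ (input_string : String), Dom_find_mirror_characters input_string → Spec_find_mirror_characters input_string (find_mirror_characters input_string)

-- ===== LEMMAS AND PROOFS =====

-- A's per-character step, named so the two steps can be compared pointwise
def pvStepA (ch : Char) : Char :=
  let lower_char := PySem.Chars.lowerChar ch
  if pvMirrorMapping.contains lower_char then
    let mirror_char := (pvMirrorMapping.get? lower_char).getD ch
    if PySem.Chars.isupper ch then PySem.Chars.upperChar mirror_char else mirror_char
  else ch

-- B's per-character step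
def pvStepB (ch : Char) : Char := (pvTranslateTable.get? ch.toNat).getD ch

set_option maxRecDepth 4000 in
theorem pvStep_eq_ofNat : ∀ n : Nat, n < 127 → pvStepA (Char.ofNat n) = pvStepB (Char.ofNat n) := by decide

theorem pvStep_eq (c : Char) (hc : pvDomChar c = true) : pvStepA c = pvStepB c := by
  have h : c.toNat < 127 := by
    simp [pvDomChar] at hc
    omega
  have := pvStep_eq_ofNat c.toNat h
  rwa [Char.ofNat_toNat] at this

theorem find_mirror_characters_spec : Claim_equal_find_mirror_characters := by
  intro s hs
  unfold Spec_find_mirror_characters find_mirror_characters find_mirror_characters_alt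
  have hA : s.toList.foldl (fun acc ch =>
      let lower_char := PySem.Chars.lowerChar ch
      if pvMirrorMapping.contains lower_char then
        let mirror_char := (pvMirrorMapping.get? lower_char).getD ch
        let mirror_char := if PySem.Chars.isupper ch then PySem.Chars.upperChar mirror_char else mirror_char
        acc ++ [mirror_char]
      else acc ++ [ch]) [] = s.toList.map pvStepA := by
    have hfun : (fun (acc : List Char) ch =>
        let lower_char := PySem.Chars.lowerChar ch
        if pvMirrorMapping.contains lower_char then
          let mirror_char := (pvMirrorMapping.get? lower_char).getD ch
          let mirror_char := if PySem.Chars.isupper ch then PySem.Chars.upperChar mirror_char else mirror_char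
          acc ++ [mirror_char]
        else acc ++ [ch]) = fun acc ch => acc ++ [pvStepA ch] := by
      funext acc ch
      by_cases h : pvMirrorMapping.contains (PySem.Chars.lowerChar ch) <;> simp [pvStepA, h]
    rw [hfun]
    simpa using PySem.List.foldl_append_singleton_eq_map pvStepA s.toList []
  rw [hA]
  refine congrArg String.ofList (List.map_congr_left ?_)
  intro c hcmem
  have hc : pvDomChar c = true := by
    have := hs
    unfold Dom_find_mirror_characters pvDomStr at this
    exact (List.all_eq_true.mp this) c hcmem
  exact pvStep_eq c hc
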